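-- pv_equiv track=rewrite | github.com/thomyks/StreamlitScavengerAI | schema_generator.py | detect_business_domain
-- ===== SOURCE A (Python) =====
-- def detect_business_domain(table_name: str) -> str:
--     """Detect business domain from table name for better prompt context"""
--     table_lower = table_name.lower()
--
--     if any(term in table_lower for term in ['sap', 'vbak', 'vbap', 'ekko', 'ekpo']):
--         return "SAP ERP systems"
--     elif any(term in table_lower for term in ['crm', 'customer', 'contact', 'lead']):
--         return "customer relationship management (CRM)"
--     elif any(term in table_lower for term in ['sales', 'order', 'invoice', 'billing']):
--         return "sales and distribution"
--     elif any(term in table_lower for term in ['finance', 'accounting', 'ledger', 'payment']):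
--         return "financial management"
--     elif any(term in table_lower for term in ['inventory', 'warehouse', 'stock', 'material']):
--         return "inventory and supply chain management"
--     elif any(term in table_lower for term in ['hr', 'employee', 'payroll', 'staff']):
--         return "human resources management"
--     else:
--         return "business data management"
-- ===== SOURCE B (Python) =====
-- # B: single left-to-right scan over the string's positions, maintaining the
-- # minimum priority of any keyword that starts at a scanned position.
-- _KEYWORDS = [
--     ('sap', 0), ('vbak', 0), ('vbap', 0), ('ekko', 0), ('ekpo', 0),
--     ('crm', 1), ('customer', 1), ('contact', 1), ('lead', 1),
--     ('sales', 2), ('order', 2), ('invoice', 2), ('billing', 2),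
--     ('finance', 3), ('accounting', 3), ('ledger', 3), ('payment', 3),
--     ('inventory', 4), ('warehouse', 4), ('stock', 4), ('material', 4),
--     ('hr', 5), ('employee', 5), ('payroll', 5), ('staff', 5),
-- ]
-- _DOMAINS = [
--     "SAP ERP systems",
--     "customer relationship management (CRM)",
--     "sales and distribution",
--     "financial management",
--     "inventory and supply chain management",
--     "human resources management",
--     "business data management",
-- ]
--
-- def detect_business_domain(table_name: str) -> str:
--     s = table_name.lower()
--     best = 6  # index of the default domain
--     for i in range(len(s) + 1):
--         for kw, prio in _KEYWORDS:
--             if prio < best and s.startswith(kw, i):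
--                 best = prio
--     return _DOMAINS[best]
-- ===== Notes on version B (the rewrite author's own statement) =====
-- stated objective: alternative
-- what changed: Instead of testing each keyword group for substring membership in cascade order, B makes a single scan over the string's positions, checking which keywords start at each position and maintaining the minimum matched priority in an accumulator, then indexes a domain table with that minimum.
import Mathlib
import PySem

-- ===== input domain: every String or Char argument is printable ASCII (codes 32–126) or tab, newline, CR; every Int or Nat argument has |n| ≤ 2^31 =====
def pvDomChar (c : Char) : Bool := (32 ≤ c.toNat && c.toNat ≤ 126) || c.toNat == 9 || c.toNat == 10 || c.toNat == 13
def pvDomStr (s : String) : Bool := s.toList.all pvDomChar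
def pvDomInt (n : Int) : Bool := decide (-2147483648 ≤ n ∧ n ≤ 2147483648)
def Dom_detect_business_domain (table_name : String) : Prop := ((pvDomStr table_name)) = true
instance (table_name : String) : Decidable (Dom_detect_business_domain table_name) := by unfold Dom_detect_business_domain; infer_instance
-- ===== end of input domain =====

-- B replaces A's if/elif substring-membership cascade by one scan over the string's positions
-- that keeps the minimum matched keyword priority and indexes a domain table (alternative; not faster).


-- ===== PORT A =====
def detect_business_domain (table_name : String) : String :=
  let table_lower := PySem.Str.lower table_name
  if ["sap", "vbak", "vbap", "ekko", "ekpo"].any (fun term => PySem.Str.isIn term table_lower) then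
    "SAP ERP systems"
  else if ["crm", "customer", "contact", "lead"].any (fun term => PySem.Str.isIn term table_lower) then
    "customer relationship management (CRM)"
  else if ["sales", "order", "invoice", "billing"].any (fun term => PySem.Str.isIn term table_lower) then
    "sales and distribution"
  else if ["finance", "accounting", "ledger", "payment"].any (fun term => PySem.Str.isIn term table_lower) then
    "financial management"
  else if ["inventory", "warehouse", "stock", "material"].any (fun term => PySem.Str.isIn term table_lower) then
    "inventory and supply chain management"
  else if ["hr", "employee", "payroll", "staff"].any (fun term => PySem.Str.isIn term table_lower) then
    "human resources management"
  else
    "business data management"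

-- ===== PORT B =====
-- _KEYWORDS: flat (keyword, priority) list
def dbdKeywords : List (List Char × Nat) :=
  [ ("sap".toList, 0), ("vbak".toList, 0), ("vbap".toList, 0), ("ekko".toList, 0), ("ekpo".toList, 0),
    ("crm".toList, 1), ("customer".toList, 1), ("contact".toList, 1), ("lead".toList, 1),
    ("sales".toList, 2), ("order".toList, 2), ("invoice".toList, 2), ("billing".toList, 2),
    ("finance".toList, 3), ("accounting".toList, 3), ("ledger".toList, 3), ("payment".toList, 3),
    ("inventory".toList, 4), ("warehouse".toList, 4), ("stock".toList, 4), ("material".toList, 4),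
    ("hr".toList, 5), ("employee".toList, 5), ("payroll".toList, 5), ("staff".toList, 5) ]

-- _DOMAINS: the domain names, indexed by priority; index 6 is the default
def dbdDomains : List String :=
  [ "SAP ERP systems",
    "customer relationship management (CRM)",
    "sales and distribution",
    "financial management",
    "inventory and supply chain management",
    "human resources management",
    "business data management" ]

-- the two nested loops of Source B: for i in range(len(s)+1): for kw, prio in _KEYWORDS: …
-- (Python's s.startswith(kw, i) with 0 ≤ i ≤ len(s) is exactly startswith (s.drop i) kw)
def dbdBest (s : List Char) : Nat :=
  (List.range (s.length + 1)).foldl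
    (fun best i =>
      dbdKeywords.foldl
        (fun b kp => if kp.2 < b && PySem.Chars.startswith (s.drop i) kp.1 then kp.2 else b)
        best)
    6

def detect_business_domain_alt (table_name : String) : String :=
  let s := (PySem.Str.lower table_name).toList
  dbdDomains.getD (dbdBest s) ""

-- ===== PRECONDITION & SPEC =====
def Spec_detect_business_domain (table_name : String) (out : String) : Prop := out = detect_business_domain_alt table_name
instance (table_name : String) (out : String) : Decidable (Spec_detect_business_domain table_name out) := by unfold Spec_detect_business_domain; infer_instance

-- ===== CLAIM (what is proved, stated in full; the proofs are below) =====
def Claim_equal_detect_business_domain : Prop := ∀ (table_name : String), Dom_detect_business_domain table_name → Spec_detect_business_domain table_name (detect_business_domain table_name)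

-- ===== LEMMAS AND PROOFS =====

-- inner loop: the accumulator can only go down, only to a matched priority, and
-- ends ≤ every matched priority
theorem dbd_inner_spec (suf : List Char) (l : List (List Char × Nat)) (b : Nat) :
    (l.foldl (fun b kp => if kp.2 < b && PySem.Chars.startswith suf kp.1 then kp.2 else b) b) ≤ b ∧
    ((l.foldl (fun b kp => if kp.2 < b && PySem.Chars.startswith suf kp.1 then kp.2 else b) b) = b ∨
      ∃ kp ∈ l, PySem.Chars.startswith suf kp.1 = true ∧
        (l.foldl (fun b kp => if kp.2 < b && PySem.Chars.startswith suf kp.1 then kp.2 else b) b) = kp.2) ∧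
    (∀ kp ∈ l, PySem.Chars.startswith suf kp.1 = true →
      (l.foldl (fun b kp => if kp.2 < b && PySem.Chars.startswith suf kp.1 then kp.2 else b) b) ≤ kp.2) := by
  induction l generalizing b with
  | nil => simp
  | cons kp t ih =>
    simp only [List.foldl_cons]
    by_cases hc : (kp.2 < b && PySem.Chars.startswith suf kp.1) = true
    · have hlt : kp.2 < b := by
        have := (Bool.and_eq_true_iff.mp hc).1; simpa using this
      have hsw : PySem.Chars.startswith suf kp.1 = true := (Bool.and_eq_true_iff.mp hc).2
      rw [if_pos hc]
      obtain ⟨ih1, ih2, ih3⟩ := ih kp.2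
      refine ⟨le_of_lt (lt_of_le_of_lt ih1 hlt), ?_, ?_⟩
      · rcases ih2 with h | ⟨kq, hkq, hsq, hrq⟩
        · exact Or.inr ⟨kp, List.mem_cons_self .., hsw, h⟩
        · exact Or.inr ⟨kq, List.mem_cons_of_mem _ hkq, hsq, hrq⟩
      · intro kq hkq hsq
        rcases List.mem_cons.mp hkq with h | hmem
        · rw [h]; exact ih1
        · exact ih3 kq hmem hsq
    · rw [if_neg hc]
      obtain ⟨ih1, ih2, ih3⟩ := ih b
      refine ⟨ih1, ?_, ?_⟩
      · rcases ih2 with h | ⟨kq, hkq, hsq, hrq⟩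
        · exact Or.inl h
        · exact Or.inr ⟨kq, List.mem_cons_of_mem _ hkq, hsq, hrq⟩
      · intro kq hkq hsq
        rcases List.mem_cons.mp hkq with h | hmem
        · have hnlt : ¬ kp.2 < b := by
            intro hlt
            exact hc (by simp [hlt, h ▸ hsq])
          rw [h]
          exact le_trans ih1 (by omega)
        · exact ih3 kq hmem hsq

-- outer loop over an arbitrary index list
theorem dbd_outer_spec (s : List Char) (idxs : List Nat) (b : Nat) :
    (idxs.foldl (fun best i => dbdKeywords.foldl
        (fun b kp => if kp.2 < b && PySem.Chars.startswith (s.drop i) kp.1 then kp.2 else b) best) b) ≤ b ∧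
    ((idxs.foldl (fun best i => dbdKeywords.foldl
        (fun b kp => if kp.2 < b && PySem.Chars.startswith (s.drop i) kp.1 then kp.2 else b) best) b) = b ∨
      ∃ kp ∈ dbdKeywords, (∃ i ∈ idxs, PySem.Chars.startswith (s.drop i) kp.1 = true) ∧
        (idxs.foldl (fun best i => dbdKeywords.foldl
          (fun b kp => if kp.2 < b && PySem.Chars.startswith (s.drop i) kp.1 then kp.2 else b) best) b) = kp.2) ∧
    (∀ kp ∈ dbdKeywords, ∀ i ∈ idxs, PySem.Chars.startswith (s.drop i) kp.1 = true →
      (idxs.foldl (fun best i => dbdKeywords.foldl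
        (fun b kp => if kp.2 < b && PySem.Chars.startswith (s.drop i) kp.1 then kp.2 else b) best) b) ≤ kp.2) := by
  induction idxs generalizing b with
  | nil => simp
  | cons i t ih =>
    simp only [List.foldl_cons]
    obtain ⟨in1, in2, in3⟩ := dbd_inner_spec (s.drop i) dbdKeywords b
    obtain ⟨ih1, ih2, ih3⟩ := ih (dbdKeywords.foldl
        (fun b kp => if kp.2 < b && PySem.Chars.startswith (s.drop i) kp.1 then kp.2 else b) b)
    refine ⟨le_trans ih1 in1, ?_, ?_⟩
    · rcases ih2 with h | ⟨kq, hkq, ⟨j, hj, hsj⟩, hrq⟩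
      · rw [h]
        rcases in2 with h' | ⟨kq, hkq, hsq, hrq⟩
        · exact Or.inl h'
        · exact Or.inr ⟨kq, hkq, ⟨i, List.mem_cons_self, hsq⟩, hrq⟩
      · exact Or.inr ⟨kq, hkq, ⟨j, List.mem_cons_of_mem _ hj, hsj⟩, hrq⟩
    · intro kq hkq j hj hsj
      rcases List.mem_cons.mp hj with rfl | hmem
      · exact le_trans ih1 (in3 kq hkq hsj)
      · exact ih3 kq hkq j hmem hsj

-- for a nonempty keyword, matching at SOME drop position = matching at a position in range(len+1)
theorem exists_mem_range_startswith_iff (s kw : List Char) (hkw : kw ≠ []) :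
    (∃ i ∈ List.range (s.length + 1), PySem.Chars.startswith (s.drop i) kw = true) ↔
      PySem.Chars.isIn kw s = true := by
  rw [← PySem.Chars.exists_prefix_drop_iff_isIn]
  constructor
  · rintro ⟨i, _, hsw⟩
    exact ⟨i, (PySem.Chars.startswith_iff _ _).mp hsw⟩
  · rintro ⟨j, hj⟩
    by_cases hle : j ≤ s.length
    · exact ⟨j, List.mem_range.mpr (by omega), (PySem.Chars.startswith_iff _ _).mpr hj⟩
    · exfalso
      have : s.drop j = [] := List.drop_eq_nil_of_le (by omega)
      rw [this] at hj
      exact hkw (List.prefix_nil.mp hj)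

theorem dbdBest_spec (s : List Char) :
    dbdBest s ≤ 6 ∧
    (dbdBest s = 6 ∨ ∃ kp ∈ dbdKeywords, PySem.Chars.isIn kp.1 s = true ∧ dbdBest s = kp.2) ∧
    (∀ kp ∈ dbdKeywords, PySem.Chars.isIn kp.1 s = true → dbdBest s ≤ kp.2) := by
  obtain ⟨h1, h2, h3⟩ := dbd_outer_spec s (List.range (s.length + 1)) 6
  have hne : ∀ kp ∈ dbdKeywords, kp.1 ≠ [] := by decide
  refine ⟨h1, ?_, ?_⟩
  · rcases h2 with h | ⟨kp, hkp, hex, hr⟩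
    · exact Or.inl h
    · exact Or.inr ⟨kp, hkp, (exists_mem_range_startswith_iff s kp.1 (hne kp hkp)).mp hex, hr⟩
  · intro kp hkp hin
    obtain ⟨i, hi, hsw⟩ := (exists_mem_range_startswith_iff s kp.1 (hne kp hkp)).mpr hin
    exact h3 kp hkp i hi hsw

-- if every keyword of priority < p misses, the scan's minimum is at least p
theorem dbdBest_ge (L : List Char) (p : Nat) (hp : p ≤ 6)
    (hup : ∀ kp ∈ dbdKeywords, kp.2 < p → PySem.Chars.isIn kp.1 L = false) :
    p ≤ dbdBest L := by
  obtain ⟨hle, hmatch, _⟩ := dbdBest_spec L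
  by_contra hlt
  rcases hmatch with h | ⟨kp, hkp, hin, hr⟩
  · omega
  · have := hup kp hkp (by omega)
    rw [hin] at this
    exact Bool.true_eq_false.mp this

theorem dbdBest_le_of_isIn (L : List Char) (kw : List Char) (p : Nat)
    (hin : PySem.Chars.isIn kw L = true) (hmem : (kw, p) ∈ dbdKeywords) :
    dbdBest L ≤ p :=
  (dbdBest_spec L).2.2 (kw, p) hmem hin

-- ===== VERDICT (by name: the statement is the Claim_ definition above) =====
set_option maxHeartbeats 1000000 in
theorem detect_business_domain_spec : Claim_equal_detect_business_domain := by
  intro table_name _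
  simp only [Spec_detect_business_domain, detect_business_domain, detect_business_domain_alt,
    PySem.Str.isIn_eq]
  split_ifs with h0 h1 h2 h3 h4 h5
  · simp only [List.any_cons, List.any_nil, Bool.or_eq_true] at h0
    have hl : dbdBest ((PySem.Str.lower table_name).toList) ≤ 0 := by
      rcases h0 with h | h | h | h | h | h
      · exact dbdBest_le_of_isIn _ _ 0 h (by decide)
      · exact dbdBest_le_of_isIn _ _ 0 h (by decide)
      · exact dbdBest_le_of_isIn _ _ 0 h (by decide)
      · exact dbdBest_le_of_isIn _ _ 0 h (by decide)
      · exact dbdBest_le_of_isIn _ _ 0 h (by decide)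
      · simp at h
    rw [show dbdBest ((PySem.Str.lower table_name).toList) = 0 from Nat.le_zero.mp hl]; rfl
  · simp only [List.any_cons, List.any_nil, Bool.or_eq_true] at h1
    have hl : dbdBest ((PySem.Str.lower table_name).toList) ≤ 1 := by
      rcases h1 with h | h | h | h | h
      · exact dbdBest_le_of_isIn _ _ 1 h (by decide)
      · exact dbdBest_le_of_isIn _ _ 1 h (by decide)
      · exact dbdBest_le_of_isIn _ _ 1 h (by decide)
      · exact dbdBest_le_of_isIn _ _ 1 h (by decide)
      · simp at h
    have hg : 1 ≤ dbdBest ((PySem.Str.lower table_name).toList) := by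
      refine dbdBest_ge _ 1 (by omega) ?_
      intro kp hkp hlt
      simp only [List.any_cons, List.any_nil, Bool.or_eq_true, not_or, Bool.not_eq_true] at h0
      simp only [dbdKeywords, List.mem_cons, List.not_mem_nil, or_false] at hkp
      rcases hkp with rfl | rfl | rfl | rfl | rfl | rfl | rfl | rfl | rfl | rfl | rfl | rfl |
        rfl | rfl | rfl | rfl | rfl | rfl | rfl | rfl | rfl | rfl | rfl | rfl | rfl
      exacts [h0.1,
        h0.2.1,
        h0.2.2.1,
        h0.2.2.2.1,
        h0.2.2.2.2.1,
        absurd hlt (by decide),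
        absurd hlt (by decide),
        absurd hlt (by decide),
        absurd hlt (by decide),
        absurd hlt (by decide),
        absurd hlt (by decide),
        absurd hlt (by decide),
        absurd hlt (by decide),
        absurd hlt (by decide),
        absurd hlt (by decide),
        absurd hlt (by decide),
        absurd hlt (by decide),
        absurd hlt (by decide),
        absurd hlt (by decide),
        absurd hlt (by decide),
        absurd hlt (by decide),
        absurd hlt (by decide),
        absurd hlt (by decide),
        absurd hlt (by decide),
        absurd hlt (by decide)]
    rw [show dbdBest ((PySem.Str.lower table_name).toList) = 1 from le_antisymm hl hg]; rfl
  · simp only [List.any_cons, List.any_nil, Bool.or_eq_true] at h2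
    have hl : dbdBest ((PySem.Str.lower table_name).toList) ≤ 2 := by
      rcases h2 with h | h | h | h | h
      · exact dbdBest_le_of_isIn _ _ 2 h (by decide)
      · exact dbdBest_le_of_isIn _ _ 2 h (by decide)
      · exact dbdBest_le_of_isIn _ _ 2 h (by decide)
      · exact dbdBest_le_of_isIn _ _ 2 h (by decide)
      · simp at h
    have hg : 2 ≤ dbdBest ((PySem.Str.lower table_name).toList) := by
      refine dbdBest_ge _ 2 (by omega) ?_
      intro kp hkp hlt
      simp only [List.any_cons, List.any_nil, Bool.or_eq_true, not_or, Bool.not_eq_true] at h0 h1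
      simp only [dbdKeywords, List.mem_cons, List.not_mem_nil, or_false] at hkp
      rcases hkp with rfl | rfl | rfl | rfl | rfl | rfl | rfl | rfl | rfl | rfl | rfl | rfl |
        rfl | rfl | rfl | rfl | rfl | rfl | rfl | rfl | rfl | rfl | rfl | rfl | rfl
      exacts [h0.1,
        h0.2.1,
        h0.2.2.1,
        h0.2.2.2.1,
        h0.2.2.2.2.1,
        h1.1,
        h1.2.1,
        h1.2.2.1,
        h1.2.2.2.1,
        absurd hlt (by decide),
        absurd hlt (by decide),
        absurd hlt (by decide),
        absurd hlt (by decide),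
        absurd hlt (by decide),
        absurd hlt (by decide),
        absurd hlt (by decide),
        absurd hlt (by decide),
        absurd hlt (by decide),
        absurd hlt (by decide),
        absurd hlt (by decide),
        absurd hlt (by decide),
        absurd hlt (by decide),
        absurd hlt (by decide),
        absurd hlt (by decide),
        absurd hlt (by decide)]
    rw [show dbdBest ((PySem.Str.lower table_name).toList) = 2 from le_antisymm hl hg]; rfl
  · simp only [List.any_cons, List.any_nil, Bool.or_eq_true] at h3
    have hl : dbdBest ((PySem.Str.lower table_name).toList) ≤ 3 := by
      rcases h3 with h | h | h | h | h
      · exact dbdBest_le_of_isIn _ _ 3 h (by decide)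
      · exact dbdBest_le_of_isIn _ _ 3 h (by decide)
      · exact dbdBest_le_of_isIn _ _ 3 h (by decide)
      · exact dbdBest_le_of_isIn _ _ 3 h (by decide)
      · simp at h
    have hg : 3 ≤ dbdBest ((PySem.Str.lower table_name).toList) := by
      refine dbdBest_ge _ 3 (by omega) ?_
      intro kp hkp hlt
      simp only [List.any_cons, List.any_nil, Bool.or_eq_true, not_or, Bool.not_eq_true] at h0 h1 h2
      simp only [dbdKeywords, List.mem_cons, List.not_mem_nil, or_false] at hkp
      rcases hkp with rfl | rfl | rfl | rfl | rfl | rfl | rfl | rfl | rfl | rfl | rfl | rfl |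
        rfl | rfl | rfl | rfl | rfl | rfl | rfl | rfl | rfl | rfl | rfl | rfl | rfl
      exacts [h0.1,
        h0.2.1,
        h0.2.2.1,
        h0.2.2.2.1,
        h0.2.2.2.2.1,
        h1.1,
        h1.2.1,
        h1.2.2.1,
        h1.2.2.2.1,
        h2.1,
        h2.2.1,
        h2.2.2.1,
        h2.2.2.2.1,
        absurd hlt (by decide),
        absurd hlt (by decide),
        absurd hlt (by decide),
        absurd hlt (by decide),
        absurd hlt (by decide),
        absurd hlt (by decide),
        absurd hlt (by decide),
        absurd hlt (by decide),
        absurd hlt (by decide),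
        absurd hlt (by decide),
        absurd hlt (by decide),
        absurd hlt (by decide)]
    rw [show dbdBest ((PySem.Str.lower table_name).toList) = 3 from le_antisymm hl hg]; rfl
  · simp only [List.any_cons, List.any_nil, Bool.or_eq_true] at h4
    have hl : dbdBest ((PySem.Str.lower table_name).toList) ≤ 4 := by
      rcases h4 with h | h | h | h | h
      · exact dbdBest_le_of_isIn _ _ 4 h (by decide)
      · exact dbdBest_le_of_isIn _ _ 4 h (by decide)
      · exact dbdBest_le_of_isIn _ _ 4 h (by decide)
      · exact dbdBest_le_of_isIn _ _ 4 h (by decide)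
      · simp at h
    have hg : 4 ≤ dbdBest ((PySem.Str.lower table_name).toList) := by
      refine dbdBest_ge _ 4 (by omega) ?_
      intro kp hkp hlt
      simp only [List.any_cons, List.any_nil, Bool.or_eq_true, not_or, Bool.not_eq_true] at h0 h1 h2 h3
      simp only [dbdKeywords, List.mem_cons, List.not_mem_nil, or_false] at hkp
      rcases hkp with rfl | rfl | rfl | rfl | rfl | rfl | rfl | rfl | rfl | rfl | rfl | rfl |
        rfl | rfl | rfl | rfl | rfl | rfl | rfl | rfl | rfl | rfl | rfl | rfl | rfl
      exacts [h0.1,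
        h0.2.1,
        h0.2.2.1,
        h0.2.2.2.1,
        h0.2.2.2.2.1,
        h1.1,
        h1.2.1,
        h1.2.2.1,
        h1.2.2.2.1,
        h2.1,
        h2.2.1,
        h2.2.2.1,
        h2.2.2.2.1,
        h3.1,
        h3.2.1,
        h3.2.2.1,
        h3.2.2.2.1,
        absurd hlt (by decide),
        absurd hlt (by decide),
        absurd hlt (by decide),
        absurd hlt (by decide),
        absurd hlt (by decide),
        absurd hlt (by decide),
        absurd hlt (by decide),
        absurd hlt (by decide)]
    rw [show dbdBest ((PySem.Str.lower table_name).toList) = 4 from le_antisymm hl hg]; rfl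
  · simp only [List.any_cons, List.any_nil, Bool.or_eq_true] at h5
    have hl : dbdBest ((PySem.Str.lower table_name).toList) ≤ 5 := by
      rcases h5 with h | h | h | h | h
      · exact dbdBest_le_of_isIn _ _ 5 h (by decide)
      · exact dbdBest_le_of_isIn _ _ 5 h (by decide)
      · exact dbdBest_le_of_isIn _ _ 5 h (by decide)
      · exact dbdBest_le_of_isIn _ _ 5 h (by decide)
      · simp at h
    have hg : 5 ≤ dbdBest ((PySem.Str.lower table_name).toList) := by
      refine dbdBest_ge _ 5 (by omega) ?_
      intro kp hkp hlt
      simp only [List.any_cons, List.any_nil, Bool.or_eq_true, not_or, Bool.not_eq_true] at h0 h1 h2 h3 h4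
      simp only [dbdKeywords, List.mem_cons, List.not_mem_nil, or_false] at hkp
      rcases hkp with rfl | rfl | rfl | rfl | rfl | rfl | rfl | rfl | rfl | rfl | rfl | rfl |
        rfl | rfl | rfl | rfl | rfl | rfl | rfl | rfl | rfl | rfl | rfl | rfl | rfl
      exacts [h0.1,
        h0.2.1,
        h0.2.2.1,
        h0.2.2.2.1,
        h0.2.2.2.2.1,
        h1.1,
        h1.2.1,
        h1.2.2.1,
        h1.2.2.2.1,
        h2.1,
        h2.2.1,
        h2.2.2.1,
        h2.2.2.2.1,
        h3.1,
        h3.2.1,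
        h3.2.2.1,
        h3.2.2.2.1,
        h4.1,
        h4.2.1,
        h4.2.2.1,
        h4.2.2.2.1,
        absurd hlt (by decide),
        absurd hlt (by decide),
        absurd hlt (by decide),
        absurd hlt (by decide)]
    rw [show dbdBest ((PySem.Str.lower table_name).toList) = 5 from le_antisymm hl hg]; rfl
  · have hg : 6 ≤ dbdBest ((PySem.Str.lower table_name).toList) := by
      refine dbdBest_ge _ 6 (by omega) ?_
      intro kp hkp hlt
      simp only [List.any_cons, List.any_nil, Bool.or_eq_true, not_or, Bool.not_eq_true] at h0 h1 h2 h3 h4 h5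
      simp only [dbdKeywords, List.mem_cons, List.not_mem_nil, or_false] at hkp
      rcases hkp with rfl | rfl | rfl | rfl | rfl | rfl | rfl | rfl | rfl | rfl | rfl | rfl |
        rfl | rfl | rfl | rfl | rfl | rfl | rfl | rfl | rfl | rfl | rfl | rfl | rfl
      exacts [h0.1,
        h0.2.1,
        h0.2.2.1,
        h0.2.2.2.1,
        h0.2.2.2.2.1,
        h1.1,
        h1.2.1,
        h1.2.2.1,
        h1.2.2.2.1,
        h2.1,
        h2.2.1,
        h2.2.2.1,
        h2.2.2.2.1,
        h3.1,
        h3.2.1,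
        h3.2.2.1,
        h3.2.2.2.1,
        h4.1,
        h4.2.1,
        h4.2.2.1,
        h4.2.2.2.1,
        h5.1,
        h5.2.1,
        h5.2.2.1,
        h5.2.2.2.1]
    rw [show dbdBest ((PySem.Str.lower table_name).toList) = 6 from le_antisymm (dbdBest_spec _).1 hg]; rfl
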